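-- pv_equiv track=rewrite | github.com/prakash472/NaiveBaye-s-Classifier | nblearn.py | handleMissingTokens
-- ===== SOURCE A (Python) =====
-- def handleMissingTokens(tokens_dict,vocab_dict):
--     final_dict={}
--     for token in vocab_dict:
--         if token in tokens_dict:
--             final_dict[token]=tokens_dict[token]
--         else:
--             final_dict[token]=0
--     return final_dict
-- ===== SOURCE B (Python) =====
-- def handleMissingTokens(tokens_dict, vocab_dict):
--     final_dict = {token: 0 for token in vocab_dict}
--     for token, count in tokens_dict.items():
--         if token in final_dict:
--             final_dict[token] = count
--     return final_dict
-- ===== Notes on version B (the rewrite author's own statement) =====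
-- stated objective: alternative
-- what changed: B builds a zero-initialized table over the vocabulary first and then makes one pass over tokens_dict, overwriting entries whose key is in the table, instead of A's single vocab-driven scan that probes tokens_dict per key.
import Mathlib
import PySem

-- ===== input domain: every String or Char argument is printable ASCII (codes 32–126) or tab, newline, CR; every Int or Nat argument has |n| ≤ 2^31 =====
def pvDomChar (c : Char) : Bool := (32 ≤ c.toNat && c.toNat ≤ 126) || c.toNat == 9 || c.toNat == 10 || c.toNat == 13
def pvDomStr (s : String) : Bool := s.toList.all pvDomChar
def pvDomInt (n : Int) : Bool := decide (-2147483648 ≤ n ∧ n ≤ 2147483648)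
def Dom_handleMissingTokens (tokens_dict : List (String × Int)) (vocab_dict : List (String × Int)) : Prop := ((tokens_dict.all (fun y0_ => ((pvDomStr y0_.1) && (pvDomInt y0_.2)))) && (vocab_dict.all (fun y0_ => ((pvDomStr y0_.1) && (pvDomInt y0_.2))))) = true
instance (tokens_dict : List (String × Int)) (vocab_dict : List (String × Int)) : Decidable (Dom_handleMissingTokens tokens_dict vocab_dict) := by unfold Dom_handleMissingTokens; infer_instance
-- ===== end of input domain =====

-- B replaces A's vocab-driven scan (probe tokens_dict per vocab key) by a zero-initialized
-- table over the vocabulary followed by one overwrite pass over tokens_dict (alternative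
-- decomposition, same cost). Return-value equivalence only; neither mutates its arguments.

-- ===== PORT A =====
-- A: final_dict = {}; for token in vocab_dict: final_dict[token] = tokens_dict[token] if
-- token in tokens_dict else 0; return final_dict
def handleMissingTokens (tokens_dict : List (String × Int)) (vocab_dict : List (String × Int)) : List (String × Int) :=
  (vocab_dict.foldl
    (fun (final : PySem.Dict String Int) p =>
      if (PySem.Dict.mk tokens_dict).contains p.1 then
        final.insert p.1 ((PySem.Dict.mk tokens_dict).getD p.1 0)
      else
        final.insert p.1 0)
    PySem.Dict.empty).items

-- ===== PORT B =====
-- B: final_dict = {token: 0 for token in vocab_dict}; for token, count in tokens_dict.items():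
-- if token in final_dict: final_dict[token] = count; return final_dict
def handleMissingTokens_alt (tokens_dict : List (String × Int)) (vocab_dict : List (String × Int)) : List (String × Int) :=
  (tokens_dict.foldl
    (fun (final : PySem.Dict String Int) p =>
      if final.contains p.1 then final.insert p.1 p.2 else final)
    (vocab_dict.foldl (fun (final : PySem.Dict String Int) p => final.insert p.1 0)
      PySem.Dict.empty)).items

-- ===== PRECONDITION & SPEC =====
-- Pre_ excludes association lists in which tokens_dict carries duplicate keys: such lists do
-- not represent any Python dict (A's input is a dict, whose keys are unique), and on them
-- first-match lookup (A's port) and sequential overwrite (B's port) are equally defensible.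
def Pre_handleMissingTokens (tokens_dict : List (String × Int)) (vocab_dict : List (String × Int)) : Prop :=
  (tokens_dict.map Prod.fst).Nodup
instance (tokens_dict : List (String × Int)) (vocab_dict : List (String × Int)) : Decidable (Pre_handleMissingTokens tokens_dict vocab_dict) := by unfold Pre_handleMissingTokens; infer_instance
def pvWitness_handleMissingTokens : (List (String × Int)) × (List (String × Int)) :=
  ([("the", 3), ("cat", 1)], [("cat", 7), ("dog", 2), ("the", 5)])

def Spec_handleMissingTokens (tokens_dict : List (String × Int)) (vocab_dict : List (String × Int)) (out : List (String × Int)) : Prop := out = handleMissingTokens_alt tokens_dict vocab_dict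
instance (tokens_dict : List (String × Int)) (vocab_dict : List (String × Int)) (out : List (String × Int)) : Decidable (Spec_handleMissingTokens tokens_dict vocab_dict out) := by unfold Spec_handleMissingTokens; infer_instance

-- ===== CLAIM (what is proved, stated in full; the proofs are below) =====
def Claim_equal_handleMissingTokens : Prop := ∀ (tokens_dict : List (String × Int)) (vocab_dict : List (String × Int)), Dom_handleMissingTokens tokens_dict vocab_dict → Pre_handleMissingTokens tokens_dict vocab_dict → Spec_handleMissingTokens tokens_dict vocab_dict (handleMissingTokens tokens_dict vocab_dict)

-- ===== LEMMAS AND PROOFS =====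

-- A's loop body always inserts p.1 with the value (Dict.mk tokens_dict).getD p.1 0.
theorem hmtA_step_eq (tokens_dict : List (String × Int)) :
    (fun (final : PySem.Dict String Int) (p : String × Int) =>
      if (PySem.Dict.mk tokens_dict).contains p.1 then
        final.insert p.1 ((PySem.Dict.mk tokens_dict).getD p.1 0)
      else final.insert p.1 0)
    = fun final p => final.insert p.1 ((PySem.Dict.mk tokens_dict).getD p.1 0) := by
  funext final p
  by_cases h : (PySem.Dict.mk tokens_dict).contains p.1
  · simp [h]
  · simp only [Bool.not_eq_true] at h
    rw [if_neg (by simp [h]), PySem.Dict.getD_of_not_contains _ _ h]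

-- getD after a fold of key-indexed inserts.
theorem hmtA_getD (f : String → Int) (l : List (String × Int)) (d : PySem.Dict String Int)
    (k : String) :
    (l.foldl (fun d p => d.insert p.1 (f p.1)) d).getD k 0
      = if k ∈ l.map Prod.fst then f k else d.getD k 0 := by
  induction l generalizing d with
  | nil => simp
  | cons a l ih =>
    simp only [List.foldl_cons, List.map_cons, List.mem_cons, ih]
    by_cases hmem : k ∈ l.map Prod.fst
    · simp [hmem]
    · by_cases hk : k = a.1
      · simp [hk, PySem.Dict.getD_insert_self]
      · simp [hmem, hk, PySem.Dict.getD_insert_of_ne _ _ _ hk]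

-- B's update loop does not change the key list.
theorem hmtB_keys (l : List (String × Int)) (d : PySem.Dict String Int) :
    (l.foldl (fun (d : PySem.Dict String Int) p =>
        if d.contains p.1 then d.insert p.1 p.2 else d) d).keys = d.keys := by
  induction l generalizing d with
  | nil => rfl
  | cons a l ih =>
    simp only [List.foldl_cons, ih]
    by_cases h : d.contains a.1
    · simp only [h, if_true, PySem.Dict.keys_insert_of_contains _ _ h]
    · simp [h]

-- getD after B's update loop, for a tokens list with distinct keys.
theorem hmtB_getD (l : List (String × Int)) (hnd : (l.map Prod.fst).Nodup)
    (d : PySem.Dict String Int) (k : String) :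
    (l.foldl (fun (d : PySem.Dict String Int) p =>
        if d.contains p.1 then d.insert p.1 p.2 else d) d).getD k 0
      = if k ∈ l.map Prod.fst ∧ d.contains k then (PySem.Dict.mk l).getD k 0
        else d.getD k 0 := by
  induction l generalizing d with
  | nil => simp
  | cons a l ih =>
    obtain ⟨a1, a2⟩ := a
    simp only [List.map_cons, List.nodup_cons] at hnd
    simp only [List.map_cons, List.mem_cons]
    rw [List.foldl_cons]
    by_cases hc : d.contains a1
    · rw [if_pos hc, ih hnd.2]
      by_cases hk : k = a1
      · subst hk
        rw [if_neg (fun h => hnd.1 h.1), if_pos ⟨Or.inl rfl, hc⟩,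
            PySem.Dict.getD_insert_self, PySem.Dict.getD_eq_get?_getD, PySem.Dict.get?_mk_cons]
        simp
      · have hcl : (d.insert a1 a2).contains k = d.contains k := by
          rw [PySem.Dict.contains_insert]; simp [hk]
        simp only [PySem.Dict.getD_insert_of_ne _ _ _ hk, PySem.Dict.getD_eq_get?_getD,
              PySem.Dict.get?_mk_cons, hcl]
        split_ifs <;> simp_all
    · rw [if_neg hc, ih hnd.2]
      by_cases hk : k = a1
      · subst hk
        rw [if_neg (fun h => hnd.1 h.1), if_neg (fun h => hc h.2)]
      · simp only [PySem.Dict.getD_eq_get?_getD, PySem.Dict.get?_mk_cons]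
        split_ifs <;> simp_all

theorem handleMissingTokens_spec' (tokens_dict vocab_dict : List (String × Int))
    (hpre : (tokens_dict.map Prod.fst).Nodup) :
    handleMissingTokens tokens_dict vocab_dict = handleMissingTokens_alt tokens_dict vocab_dict := by
  unfold handleMissingTokens handleMissingTokens_alt
  rw [hmtA_step_eq]
  set td := PySem.Dict.mk tokens_dict with htd
  set dA : PySem.Dict String Int :=
    vocab_dict.foldl (fun d p => d.insert p.1 (td.getD p.1 0)) PySem.Dict.empty with hdA
  set d0 : PySem.Dict String Int :=
    vocab_dict.foldl (fun d p => d.insert p.1 0) PySem.Dict.empty with hd0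
  set dB : PySem.Dict String Int :=
    tokens_dict.foldl (fun d p => if d.contains p.1 then d.insert p.1 p.2 else d) d0 with hdB
  -- keys coincide
  have hkA : dA.keys = PySem.Set.update (PySem.Dict.empty : PySem.Dict String Int).keys (vocab_dict.map Prod.fst) := by
    rw [hdA]; exact PySem.Dict.keys_foldl_insert_key vocab_dict Prod.fst _ _
  have hk0 : d0.keys = PySem.Set.update (PySem.Dict.empty : PySem.Dict String Int).keys (vocab_dict.map Prod.fst) := by
    rw [hd0]; exact PySem.Dict.keys_foldl_insert_key vocab_dict Prod.fst _ _
  have hkB : dB.keys = d0.keys := hmtB_keys _ _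
  have hkeys : dA.keys = dB.keys := by rw [hkA, hkB, hk0]
  -- both key lists are nodup
  have hndA : dA.keys.Nodup := by
    rw [hdA]; exact PySem.Dict.nodup_keys_foldl_insert_key _ _ _ _ PySem.Dict.nodup_keys_empty
  have hndB : dB.keys.Nodup := by
    rw [hkB, hd0]
    exact PySem.Dict.nodup_keys_foldl_insert_key _ _ _ _ PySem.Dict.nodup_keys_empty
  -- d0 holds exactly the vocab keys, each with value 0
  have hc0 : ∀ k : String, d0.contains k = decide (k ∈ vocab_dict.map Prod.fst) := by
    intro k
    rw [PySem.Dict.contains_eq_decide_mem_keys, hk0]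
    simp [PySem.Set.mem_update]
  have hg0 : ∀ k : String, d0.getD k 0 = 0 := by
    intro k
    rw [hd0, hmtA_getD (fun _ => 0)]
    split <;> rfl
  -- pointwise values agree
  have hval : ∀ k : String, dA.getD k 0 = dB.getD k 0 := by
    intro k
    rw [hdA, hdB, hmtA_getD (fun x => td.getD x 0), hmtB_getD tokens_dict hpre]
    by_cases hv : k ∈ vocab_dict.map Prod.fst
    · by_cases ht : k ∈ tokens_dict.map Prod.fst
      · simp [hv, ht, hc0 k, htd]
      · have hct : td.contains k = false := by
          rw [Bool.eq_false_iff]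
          intro hcon
          have hmemk := (PySem.Dict.contains_iff_mem_keys td k).mp hcon
          exact ht (by simpa [htd, PySem.Dict.keys] using hmemk)
        simp [hv, ht, hg0 k, PySem.Dict.getD_of_not_contains _ _ hct]
    · simp [hv, hc0 k, hg0 k]
  -- items equal
  rw [PySem.Dict.items_eq_map_keys dA hndA 0, PySem.Dict.items_eq_map_keys dB hndB 0, hkeys]
  exact List.map_congr_left (fun k _ => by rw [← hval k])

-- ===== VERDICT (by name: the statement is the Claim_ definition above) =====
theorem handleMissingTokens_spec : Claim_equal_handleMissingTokens := by
  intro tokens_dict vocab_dict _ hpre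
  exact handleMissingTokens_spec' tokens_dict vocab_dict hpre
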